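-- pv_equiv track=rewrite | github.com/aasirotkin/checkio | unfair_districts.py | it_is_fine
-- ===== SOURCE A (Python) =====
-- def it_is_fine(grid: list, candidates: tuple,
--                shift: int, amount_of_people: int) -> bool:
--     pure_candidates = {candidate for candidate in candidates
--                        if candidate >= 0}
--     length = len(pure_candidates)
--     if pure_candidates == {1, 5, 9, 13}:
--         i = 5
--     if length == 0:
--         return False
--     summation = 0
--     for pc in pure_candidates:
--         row, col = 0, 0
--         while not (row * shift <= pc < (row + 1) * shift):
--             row += 1
--         col = pc - row * shift if row > 0 else pc
--         summation += sum(grid[row][col])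
--     if summation != amount_of_people:
--         return False
--     neighbors = 0
--     for ci in pure_candidates:
--         for cj in pure_candidates:
--             b1 = cj - shift == ci
--             b2 = ci - shift == cj
--             b3 = cj - 1 == ci and cj % shift != 0
--             b4 = ci - 1 == cj and ci % shift != 0
--             if any([b1, b2, b3, b4]):
--                 neighbors += 1
--     return (neighbors >= length if length == 2 else neighbors > length) \
--            or len(pure_candidates) == 1
-- ===== SOURCE B (Python) =====
-- def it_is_fine(grid: list, candidates: tuple,
--                shift: int, amount_of_people: int) -> bool:
--     coords = {divmod(pc, shift) for pc in candidates if pc >= 0}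
--     n = len(coords)
--     if n == 0:
--         return False
--     if sum(sum(grid[r][c]) for r, c in coords) != amount_of_people:
--         return False
--     deg = 0
--     for r, c in coords:
--         deg += ((r - 1, c) in coords) + ((r + 1, c) in coords)
--         deg += (c + 1 < shift and (r, c + 1) in coords)
--         deg += (c - 1 >= 0 and (r, c - 1) in coords)
--     return (deg >= n if n == 2 else deg > n) or n == 1
-- ===== Notes on version B (the rewrite author's own statement) =====
-- stated objective: idiomatic
-- what changed: B converts each non-negative candidate once to a (row, col) coordinate via divmod and builds a coordinate set, summing people over coordinates and counting adjacency by membership of each cell's four grid neighbours, instead of A's per-candidate linear while-loop row search and quadratic ordered-pair comparison with modular edge conditions.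
import Mathlib
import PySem

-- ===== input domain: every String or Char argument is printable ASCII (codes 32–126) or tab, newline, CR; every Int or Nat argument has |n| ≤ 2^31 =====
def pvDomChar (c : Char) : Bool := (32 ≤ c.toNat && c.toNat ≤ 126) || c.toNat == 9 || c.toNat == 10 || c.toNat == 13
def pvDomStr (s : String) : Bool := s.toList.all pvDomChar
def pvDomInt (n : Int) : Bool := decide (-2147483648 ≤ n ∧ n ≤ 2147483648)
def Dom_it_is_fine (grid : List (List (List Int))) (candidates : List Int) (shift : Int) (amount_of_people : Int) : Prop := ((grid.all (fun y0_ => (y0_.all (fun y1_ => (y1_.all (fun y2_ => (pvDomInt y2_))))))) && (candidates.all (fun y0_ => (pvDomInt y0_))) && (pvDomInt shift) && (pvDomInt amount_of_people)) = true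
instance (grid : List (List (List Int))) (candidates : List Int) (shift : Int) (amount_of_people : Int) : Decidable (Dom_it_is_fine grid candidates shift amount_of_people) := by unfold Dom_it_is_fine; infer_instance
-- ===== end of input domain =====

-- B recasts each candidate as a (row, col) grid coordinate via divmod once, and counts adjacencies by
-- set membership of the four grid neighbours, instead of A's per-candidate linear row search and
-- quadratic ordered-pair scan (objective: idiomatic; equivalence of the RETURN value).

-- ===== PORT A =====
-- Python's 'while not (row*shift <= pc < (row+1)*shift): row += 1', fuel-bounded;
-- fuel pc.toNat + 1 suffices whenever shift > 0 and pc ≥ 0 (guaranteed by Pre_).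
def pvFindRow (pc shift : Int) : Nat → Int → Int
  | 0, row => row
  | fuel + 1, row =>
      if row * shift ≤ pc ∧ pc < (row + 1) * shift then row
      else pvFindRow pc shift fuel (row + 1)

def it_is_fine (grid : List (List (List Int))) (candidates : List Int) (shift : Int) (amount_of_people : Int) : Bool :=
  let pure_candidates : PySem.Set Int := PySem.Set.ofList (candidates.filter (fun c => decide (0 ≤ c)))
  let length : Int := PySem.Set.len pure_candidates
  -- A's 'if pure_candidates == {1, 5, 9, 13}: i = 5' is dead code (local i unused) and has no port
  if length = 0 then false
  else
    let summation : Int := pure_candidates.foldl (fun s pc =>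
      let row := pvFindRow pc shift (pc.toNat + 1) 0
      let col := if row > 0 then pc - row * shift else pc
      s + (PySem.List.pyGetD (PySem.List.pyGetD grid row []) col []).sum) 0
    if summation ≠ amount_of_people then false
    else
      let neighbors : Int := pure_candidates.foldl (fun n ci =>
        pure_candidates.foldl (fun n cj =>
          if cj - shift = ci ∨ ci - shift = cj ∨ (cj - 1 = ci ∧ PySem.Int.mod cj shift ≠ 0)
             ∨ (ci - 1 = cj ∧ PySem.Int.mod ci shift ≠ 0)
          then n + 1 else n) n) 0
      decide ((if length = 2 then neighbors ≥ length else neighbors > length) ∨ length = 1)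

-- ===== PORT B =====
def it_is_fine_alt (grid : List (List (List Int))) (candidates : List Int) (shift : Int) (amount_of_people : Int) : Bool :=
  let coords : PySem.Set (Int × Int) :=
    PySem.Set.ofList ((candidates.filter (fun pc => decide (0 ≤ pc))).map
      (fun pc => (PySem.Int.floordiv pc shift, PySem.Int.mod pc shift)))
  let n : Int := PySem.Set.len coords
  if n = 0 then false
  else if (coords.map (fun rc => (PySem.List.pyGetD (PySem.List.pyGetD grid rc.1 []) rc.2 []).sum)).sum ≠ amount_of_people then false
  else
    let deg : Int := coords.foldl (fun d rc =>
      d + (if PySem.Set.contains coords (rc.1 - 1, rc.2) then 1 else 0)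
        + (if PySem.Set.contains coords (rc.1 + 1, rc.2) then 1 else 0)
        + (if rc.2 + 1 < shift ∧ PySem.Set.contains coords (rc.1, rc.2 + 1) then 1 else 0)
        + (if 0 ≤ rc.2 - 1 ∧ PySem.Set.contains coords (rc.1, rc.2 - 1) then 1 else 0)) 0
    decide ((if n = 2 then deg ≥ n else deg > n) ∨ n = 1)

-- ===== PRECONDITION & SPEC =====
-- Pre_ excludes exactly the inputs where Python A does not return: with some non-negative candidate
-- present, shift ≤ 0 makes A's while loop run forever, and an out-of-range row/col raises IndexError.
def Pre_it_is_fine (grid : List (List (List Int))) (candidates : List Int) (shift : Int) (amount_of_people : Int) : Prop :=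
  (∃ c ∈ candidates, 0 ≤ c) →
    (0 < shift ∧ ∀ c ∈ candidates, 0 ≤ c →
      PySem.Int.floordiv c shift < (grid.length : Int) ∧
      PySem.Int.mod c shift < ((PySem.List.pyGetD grid (PySem.Int.floordiv c shift) []).length : Int))
instance (grid : List (List (List Int))) (candidates : List Int) (shift : Int) (amount_of_people : Int) : Decidable (Pre_it_is_fine grid candidates shift amount_of_people) := by unfold Pre_it_is_fine; infer_instance

def pvWitness_it_is_fine : List (List (List Int)) × List Int × Int × Int :=
  ([[[1], [2]], [[3], [4]]], [0, 1], 2, 3)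

def Spec_it_is_fine (grid : List (List (List Int))) (candidates : List Int) (shift : Int) (amount_of_people : Int) (out : Bool) : Prop := out = it_is_fine_alt grid candidates shift amount_of_people
instance (grid : List (List (List Int))) (candidates : List Int) (shift : Int) (amount_of_people : Int) (out : Bool) : Decidable (Spec_it_is_fine grid candidates shift amount_of_people out) := by unfold Spec_it_is_fine; infer_instance

-- ===== CLAIM (what is proved, stated in full; the proofs are below) =====
def Claim_equal_it_is_fine : Prop := ∀ (grid : List (List (List Int))) (candidates : List Int) (shift : Int) (amount_of_people : Int), Dom_it_is_fine grid candidates shift amount_of_people → Pre_it_is_fine grid candidates shift amount_of_people → Spec_it_is_fine grid candidates shift amount_of_people (it_is_fine grid candidates shift amount_of_people)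

-- ===== LEMMAS AND PROOFS =====

theorem pvWitness_ok : Dom_it_is_fine pvWitness_it_is_fine.1 pvWitness_it_is_fine.2.1 pvWitness_it_is_fine.2.2.1 pvWitness_it_is_fine.2.2.2 ∧ Pre_it_is_fine pvWitness_it_is_fine.1 pvWitness_it_is_fine.2.1 pvWitness_it_is_fine.2.2.1 pvWitness_it_is_fine.2.2.2 := by
  constructor <;> decide

-- characterisation of Python divmod for a positive divisor
theorem pv_dm_char {shift x q r : Int} (hs : 0 < shift) (hx : x = q * shift + r)
    (h0 : 0 ≤ r) (h1 : r < shift) :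
    PySem.Int.floordiv x shift = q ∧ PySem.Int.mod x shift = r := by
  have hq : PySem.Int.floordiv x shift = q :=
    (PySem.Int.floordiv_eq_iff_of_pos hs).mpr ⟨by nlinarith, by nlinarith⟩
  have hm := PySem.Int.floordiv_mul_add_mod x shift
  rw [hq] at hm
  exact ⟨hq, by linarith⟩

theorem pv_dm_self {shift x : Int} (hs : 0 < shift) :
    x = PySem.Int.floordiv x shift * shift + PySem.Int.mod x shift ∧
    0 ≤ PySem.Int.mod x shift ∧ PySem.Int.mod x shift < shift :=
  ⟨(PySem.Int.floordiv_mul_add_mod x shift).symm,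
   PySem.Int.mod_nonneg x hs, PySem.Int.mod_lt x hs⟩

theorem pvFindRow_go (pc shift : Int) (hs : 0 < shift) :
    ∀ (fuel : Nat) (row : Int), row ≤ PySem.Int.floordiv pc shift →
      (PySem.Int.floordiv pc shift - row).toNat < fuel →
      pvFindRow pc shift fuel row = PySem.Int.floordiv pc shift := by
  intro fuel
  induction fuel with
  | zero => intro row _ h; omega
  | succ fuel ih =>
      intro row hle hfuel
      rw [pvFindRow]
      by_cases h : row * shift ≤ pc ∧ pc < (row + 1) * shift
      · rw [if_pos h]
        exact ((PySem.Int.floordiv_eq_iff_of_pos hs).mpr h).symm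
      · rw [if_neg h]
        have hch := (PySem.Int.floordiv_eq_iff_of_pos (q := PySem.Int.floordiv pc shift) hs).mp rfl
        have hne : row ≠ PySem.Int.floordiv pc shift := by
          intro he; exact h (he ▸ hch)
        exact ih (row + 1) (by omega) (by omega)

theorem pvFindRow_eq (pc shift : Int) (hs : 0 < shift) (hpc : 0 ≤ pc) :
    pvFindRow pc shift (pc.toNat + 1) 0 = PySem.Int.floordiv pc shift := by
  have hch := (PySem.Int.floordiv_eq_iff_of_pos (a := pc) (b := shift) (q := PySem.Int.floordiv pc shift) hs).mp rfl
  have hq0 : 0 ≤ PySem.Int.floordiv pc shift := by nlinarith [hch.1, hch.2]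
  have hqpc : PySem.Int.floordiv pc shift ≤ pc := by nlinarith [hch.1]
  exact pvFindRow_go pc shift hs _ 0 hq0 (by omega)

-- Set.ofList commutes with mapping an injective function
theorem pv_ofList_map {f : Int → Int × Int} (hf : ∀ a b, f a = f b → a = b) (l : List Int) :
    PySem.Set.ofList (l.map f) = (PySem.Set.ofList l).map f := by
  rw [PySem.Set.ofList_eq_foldl, PySem.Set.ofList_eq_foldl]
  have key : ∀ (l : List Int) (acc : List Int),
      List.foldl PySem.Set.add (acc.map f) (l.map f) = (List.foldl PySem.Set.add acc l).map f := by
    intro l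
    induction l with
    | nil => intro acc; simp
    | cons x t ih =>
        intro acc
        have hadd : PySem.Set.add (acc.map f) (f x) = (PySem.Set.add acc x).map f := by
          simp only [PySem.Set.add, PySem.Set.contains]
          have hmem : ((acc.map f).contains (f x)) = (acc.contains x) := by
            rw [Bool.eq_iff_iff]
            simp only [List.contains_iff_mem, List.mem_map]
            constructor
            · rintro ⟨a, ha, hfa⟩; exact hf a x hfa ▸ ha
            · intro h; exact ⟨x, h, rfl⟩
          simp only [hmem]
          by_cases hx : x ∈ acc <;> simp [hx]
        simp only [List.map_cons, List.foldl_cons, hadd, ih]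
  simpa using key l []

theorem pv_count_ind (l : List Int) (hnd : l.Nodup) (v : Int) :
    l.countP (fun x => decide (x = v)) = if v ∈ l then 1 else 0 := by
  have : l.countP (fun x => decide (x = v)) = l.count v := by
    rw [List.count_eq_countP]
    exact List.countP_congr (fun x _ => by simp)
  rw [this]
  by_cases hv : v ∈ l
  · simp [hv, List.count_eq_one_of_mem hnd hv]
  · simp [hv, List.count_eq_zero_of_not_mem hv]

-- countP of a 4-way disjunction of predicates at most one of which holds splits into four counts
theorem pv_countP_or4 {α : Type} (p1 p2 p3 p4 : α → Bool) (l : List α)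
    (h : ∀ x ∈ l, (p1 x).toNat + (p2 x).toNat + (p3 x).toNat + (p4 x).toNat ≤ 1) :
    l.countP (fun x => p1 x || (p2 x || (p3 x || p4 x)))
      = l.countP p1 + (l.countP p2 + (l.countP p3 + l.countP p4)) := by
  induction l with
  | nil => simp
  | cons x t ih =>
      have hx := h x (by simp)
      have ht : ∀ y ∈ t, (p1 y).toNat + (p2 y).toNat + (p3 y).toNat + (p4 y).toNat ≤ 1 :=
        fun y hy => h y (List.mem_cons_of_mem _ hy)
      simp only [List.countP_cons, ih ht]
      by_cases h1 : p1 x = true <;> by_cases h2 : p2 x = true <;>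
        by_cases h3 : p3 x = true <;> by_cases h4 : p4 x = true <;>
        simp [h1, h2, h3, h4] at hx ⊢ <;> omega

theorem pv_count_ind_and (l : List Int) (hnd : l.Nodup) (v : Int) (C : Prop) [Decidable C] :
    l.countP (fun x => decide (x = v ∧ C)) = if C ∧ v ∈ l then 1 else 0 := by
  by_cases hC : C
  · rw [List.countP_congr (q := fun x => decide (x = v)) (fun x _ => by simp [hC])]
    rw [pv_count_ind l hnd v]
    simp [hC]
  · rw [List.countP_eq_zero.mpr (fun a _ => by simp [hC])]
    simp [hC]

-- the per-candidate core: A's inner-loop count equals B's four neighbour presence indicators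
theorem pv_core (shift : Int) (hs : 0 < shift) (L : List Int) (hnd : L.Nodup)
    (ci : Int) :
    ((L.countP (fun cj => decide (cj - shift = ci ∨ ci - shift = cj ∨
        (cj - 1 = ci ∧ PySem.Int.mod cj shift ≠ 0) ∨
        (ci - 1 = cj ∧ PySem.Int.mod ci shift ≠ 0))) : Int))
    = (if ci - shift ∈ L then 1 else 0) + (if ci + shift ∈ L then 1 else 0)
      + (if PySem.Int.mod ci shift + 1 < shift ∧ ci + 1 ∈ L then 1 else 0)
      + (if 0 ≤ PySem.Int.mod ci shift - 1 ∧ ci - 1 ∈ L then 1 else 0) := by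
  obtain ⟨hself, hc0, hc1⟩ := pv_dm_self (x := ci) hs
  set q := PySem.Int.floordiv ci shift with hq
  set c := PySem.Int.mod ci shift with hc
  -- rewrite A's pairwise test into four value tests
  have h3 : ∀ cj : Int, (cj - 1 = ci ∧ PySem.Int.mod cj shift ≠ 0) ↔ (cj = ci + 1 ∧ c + 1 < shift) := by
    intro cj
    constructor
    · rintro ⟨he, hm⟩
      have hcj : cj = ci + 1 := by omega
      refine ⟨hcj, ?_⟩
      by_contra hlt
      have hcs : c + 1 = shift := by omega
      have hx : cj = (q + 1) * shift + 0 := by rw [hcj, hself]; ring_nf; omega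
      exact hm (pv_dm_char hs hx le_rfl hs).2
    · rintro ⟨hcj, hlt⟩
      have hx : cj = q * shift + (c + 1) := by rw [hcj, hself]; ring
      have := (pv_dm_char hs hx (by omega) hlt).2
      exact ⟨by omega, by rw [this]; omega⟩
  have hpred : ∀ cj ∈ L,
      (decide (cj - shift = ci ∨ ci - shift = cj ∨
        (cj - 1 = ci ∧ PySem.Int.mod cj shift ≠ 0) ∨
        (ci - 1 = cj ∧ PySem.Int.mod ci shift ≠ 0)) = true)
      ↔ ((decide (cj = ci + shift) || (decide (cj = ci - shift) ||
          (decide (cj = ci + 1 ∧ c + 1 < shift) || decide (cj = ci - 1 ∧ 0 ≤ c - 1)))) = true) := by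
    intro cj _
    simp only [Bool.or_eq_true, decide_eq_true_eq]
    rw [h3 cj]
    omega
  rw [List.countP_congr hpred]
  have hdisj : ∀ x ∈ L,
      (decide (x = ci + shift)).toNat + (decide (x = ci - shift)).toNat
      + (decide (x = ci + 1 ∧ c + 1 < shift)).toNat + (decide (x = ci - 1 ∧ 0 ≤ c - 1)).toNat ≤ 1 := by
    intro x _
    have t : ∀ (P : Prop) (inst : Decidable P), (@decide P inst).toNat = if P then 1 else 0 :=
      fun P inst => by by_cases h : P <;> simp [h]
    rw [t _ _, t _ _, t _ _, t _ _]
    split_ifs <;> omega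
  rw [pv_countP_or4 _ _ _ _ L hdisj]
  rw [pv_count_ind L hnd (ci + shift), pv_count_ind L hnd (ci - shift),
      pv_count_ind_and L hnd (ci + 1) (c + 1 < shift), pv_count_ind_and L hnd (ci - 1) (0 ≤ c - 1)]
  push_cast [apply_ite (fun n : Nat => (n : Int))]
  ring

theorem pv_fd_nonneg {pc shift : Int} (hs : 0 < shift) (hpc : 0 ≤ pc) :
    0 ≤ PySem.Int.floordiv pc shift := by
  have hch := (PySem.Int.floordiv_eq_iff_of_pos (a := pc) (b := shift)
    (q := PySem.Int.floordiv pc shift) hs).mp rfl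
  nlinarith [hch.1, hch.2]

-- (a, b) with b in [0, shift) is a coordinate of the set iff its linearisation is a candidate
theorem pv_pair_mem {shift : Int} (hs : 0 < shift) (L : List Int) (a b : Int)
    (h0 : 0 ≤ b) (h1 : b < shift) :
    ((a, b) ∈ L.map (fun pc => (PySem.Int.floordiv pc shift, PySem.Int.mod pc shift)))
      ↔ a * shift + b ∈ L := by
  constructor
  · intro hmem
    rcases List.mem_map.mp hmem with ⟨y, hy, hdmy⟩
    have h1' := congrArg Prod.fst hdmy
    have h2' := congrArg Prod.snd hdmy
    simp only at h1' h2'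
    have hy' := PySem.Int.floordiv_mul_add_mod y shift
    rw [h1', h2'] at hy'
    rwa [hy']
  · intro hv
    refine List.mem_map.mpr ⟨a * shift + b, hv, ?_⟩
    have := pv_dm_char (x := a * shift + b) hs rfl h0 h1
    exact Prod.ext this.1 this.2

-- main equivalence
theorem pv_main (grid : List (List (List Int))) (candidates : List Int) (shift : Int)
    (amount_of_people : Int) (hpre : Pre_it_is_fine grid candidates shift amount_of_people) :
    it_is_fine grid candidates shift amount_of_people
      = it_is_fine_alt grid candidates shift amount_of_people := by
  simp only [it_is_fine, it_is_fine_alt]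
  by_cases hP : candidates.filter (fun c => decide (0 ≤ c)) = []
  · simp [hP, PySem.Set.ofList_eq_foldl, PySem.Set.len]
  · obtain ⟨c0, hc0mem⟩ := List.exists_mem_of_ne_nil _ hP
    have hc0f := List.mem_filter.mp hc0mem
    have hs : 0 < shift := (hpre ⟨c0, hc0f.1, by simpa using hc0f.2⟩).1
    set dmf : Int → Int × Int := fun pc => (PySem.Int.floordiv pc shift, PySem.Int.mod pc shift) with hdmf
    set P : List Int := candidates.filter (fun c => decide (0 ≤ c)) with hPdef
    set L : List Int := PySem.Set.ofList P with hLdef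
    have hinj : ∀ a b : Int, dmf a = dmf b → a = b := by
      intro a b h
      simp only [hdmf, Prod.ext_iff] at h
      have ha := PySem.Int.floordiv_mul_add_mod a shift
      have hb := PySem.Int.floordiv_mul_add_mod b shift
      rw [h.1, h.2] at ha
      omega
    have hK : PySem.Set.ofList (P.map dmf) = L.map dmf := pv_ofList_map hinj P
    have hnd : L.Nodup := PySem.Set.nodup_ofList P
    have hL0 : ∀ x ∈ L, 0 ≤ x := by
      intro x hx
      have := (PySem.Set.mem_ofList P x).mp hx
      rw [hPdef] at this
      simpa using (List.mem_filter.mp this).2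
    have hlen : PySem.Set.len (L.map dmf) = PySem.Set.len L := by simp [PySem.Set.len]
    rw [hK, hlen]
    -- the summation loops agree element by element
    have hsum :
        List.foldl
            (fun s pc =>
              s +
                (PySem.List.pyGetD (PySem.List.pyGetD grid (pvFindRow pc shift (pc.toNat + 1) 0) [])
                    (if pvFindRow pc shift (pc.toNat + 1) 0 > 0 then pc - pvFindRow pc shift (pc.toNat + 1) 0 * shift
                    else pc)
                    []).sum)
            0 L
          = (List.map (fun rc : Int × Int => (PySem.List.pyGetD (PySem.List.pyGetD grid rc.1 []) rc.2 []).sum)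
              (List.map dmf L)).sum := by
      have hbody : ∀ (acc : Int), ∀ pc ∈ L,
          acc +
            (PySem.List.pyGetD (PySem.List.pyGetD grid (pvFindRow pc shift (pc.toNat + 1) 0) [])
                (if pvFindRow pc shift (pc.toNat + 1) 0 > 0 then pc - pvFindRow pc shift (pc.toNat + 1) 0 * shift
                else pc)
                []).sum
          = acc +
            (PySem.List.pyGetD (PySem.List.pyGetD grid (PySem.Int.floordiv pc shift) [])
                (PySem.Int.mod pc shift) []).sum := by
        intro acc pc hpc
        have hpc0 : 0 ≤ pc := hL0 pc hpc
        rw [pvFindRow_eq pc shift hs hpc0]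
        have hfd0 := pv_fd_nonneg (pc := pc) hs hpc0
        have hmm := PySem.Int.floordiv_mul_add_mod pc shift
        have hcol : (if PySem.Int.floordiv pc shift > 0 then pc - PySem.Int.floordiv pc shift * shift else pc)
            = PySem.Int.mod pc shift := by
          by_cases hgt : PySem.Int.floordiv pc shift > 0
          · rw [if_pos hgt]; omega
          · rw [if_neg hgt]
            have hz : PySem.Int.floordiv pc shift = 0 := by omega
            rw [hz, zero_mul] at hmm
            omega
        rw [hcol]
      rw [PySem.List.foldl_congr_mem L _ _ 0 hbody, PySem.List.foldl_add]
      simp [List.map_map, Function.comp_def, hdmf]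
    rw [hsum]
    -- the adjacency counts agree: A counts ordered adjacent pairs, B sums neighbour memberships
    have hnei :
        List.foldl
            (fun n ci =>
              List.foldl
                (fun n cj =>
                  if cj - shift = ci ∨ ci - shift = cj ∨
                      (cj - 1 = ci ∧ PySem.Int.mod cj shift ≠ 0) ∨ (ci - 1 = cj ∧ PySem.Int.mod ci shift ≠ 0) then
                    n + 1
                  else n)
                n L)
            (0 : Int) L
          = List.foldl
              (fun d rc =>
                (((d + if PySem.Set.contains (List.map dmf L) (rc.1 - 1, rc.2) = true then 1 else 0) +
                      if PySem.Set.contains (List.map dmf L) (rc.1 + 1, rc.2) = true then 1 else 0) +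
                    if rc.2 + 1 < shift ∧ PySem.Set.contains (List.map dmf L) (rc.1, rc.2 + 1) = true then 1
                    else 0) +
                  if 0 ≤ rc.2 - 1 ∧ PySem.Set.contains (List.map dmf L) (rc.1, rc.2 - 1) = true then 1 else 0)
              (0 : Int) (List.map dmf L) := by
      have hA : ∀ (acc : Int), ∀ ci ∈ L,
          List.foldl
            (fun n cj =>
              if cj - shift = ci ∨ ci - shift = cj ∨
                  (cj - 1 = ci ∧ PySem.Int.mod cj shift ≠ 0) ∨ (ci - 1 = cj ∧ PySem.Int.mod ci shift ≠ 0) then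
                n + 1
              else n)
            acc L
          = acc + ((L.countP (fun cj => decide (cj - shift = ci ∨ ci - shift = cj ∨
              (cj - 1 = ci ∧ PySem.Int.mod cj shift ≠ 0) ∨
              (ci - 1 = cj ∧ PySem.Int.mod ci shift ≠ 0))) : Int)) := by
        intro acc ci _
        exact PySem.List.foldl_ite_add_one _ L acc
      have hB : ∀ (acc : Int), ∀ pc ∈ L,
          (((acc + if PySem.Set.contains (List.map dmf L) ((dmf pc).1 - 1, (dmf pc).2) = true then 1 else 0) +
                if PySem.Set.contains (List.map dmf L) ((dmf pc).1 + 1, (dmf pc).2) = true then 1 else 0) +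
              if (dmf pc).2 + 1 < shift ∧ PySem.Set.contains (List.map dmf L) ((dmf pc).1, (dmf pc).2 + 1) = true then 1
              else 0) +
            (if 0 ≤ (dmf pc).2 - 1 ∧ PySem.Set.contains (List.map dmf L) ((dmf pc).1, (dmf pc).2 - 1) = true then 1 else 0)
          = acc + ((if pc - shift ∈ L then 1 else 0) + (if pc + shift ∈ L then 1 else 0)
              + (if PySem.Int.mod pc shift + 1 < shift ∧ pc + 1 ∈ L then 1 else 0)
              + (if 0 ≤ PySem.Int.mod pc shift - 1 ∧ pc - 1 ∈ L then 1 else 0)) := by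
        intro acc pc hpc
        have hpc0 : 0 ≤ pc := hL0 pc hpc
        obtain ⟨hself, hm0, hm1⟩ := pv_dm_self (x := pc) hs
        have hfst : (dmf pc).1 = PySem.Int.floordiv pc shift := by simp [hdmf]
        have hsnd : (dmf pc).2 = PySem.Int.mod pc shift := by simp [hdmf]
        rw [hfst, hsnd]
        have m1 : ((PySem.Int.floordiv pc shift - 1, PySem.Int.mod pc shift) ∈ List.map dmf L)
            ↔ pc - shift ∈ L := by
          have h := pv_pair_mem hs L (PySem.Int.floordiv pc shift - 1) (PySem.Int.mod pc shift) hm0 hm1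
          have hv : (PySem.Int.floordiv pc shift - 1) * shift + PySem.Int.mod pc shift = pc - shift := by
            linear_combination -hself
          rw [hv] at h
          exact h
        have m2 : ((PySem.Int.floordiv pc shift + 1, PySem.Int.mod pc shift) ∈ List.map dmf L)
            ↔ pc + shift ∈ L := by
          have h := pv_pair_mem hs L (PySem.Int.floordiv pc shift + 1) (PySem.Int.mod pc shift) hm0 hm1
          have hv : (PySem.Int.floordiv pc shift + 1) * shift + PySem.Int.mod pc shift = pc + shift := by
            linear_combination -hself
          rw [hv] at h
          exact h
        have m3 : (PySem.Int.mod pc shift + 1 < shift ∧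
              (PySem.Int.floordiv pc shift, PySem.Int.mod pc shift + 1) ∈ List.map dmf L)
            ↔ (PySem.Int.mod pc shift + 1 < shift ∧ pc + 1 ∈ L) := by
          refine and_congr_right fun hlt => ?_
          have h := pv_pair_mem hs L (PySem.Int.floordiv pc shift) (PySem.Int.mod pc shift + 1) (by omega) hlt
          have hv : PySem.Int.floordiv pc shift * shift + (PySem.Int.mod pc shift + 1) = pc + 1 := by
            linear_combination -hself
          rw [hv] at h
          exact h
        have m4 : (0 ≤ PySem.Int.mod pc shift - 1 ∧
              (PySem.Int.floordiv pc shift, PySem.Int.mod pc shift - 1) ∈ List.map dmf L)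
            ↔ (0 ≤ PySem.Int.mod pc shift - 1 ∧ pc - 1 ∈ L) := by
          refine and_congr_right fun hge => ?_
          have h := pv_pair_mem hs L (PySem.Int.floordiv pc shift) (PySem.Int.mod pc shift - 1) (by omega) (by omega)
          have hv : PySem.Int.floordiv pc shift * shift + (PySem.Int.mod pc shift - 1) = pc - 1 := by
            linear_combination -hself
          rw [hv] at h
          exact h
        simp only [PySem.Set.contains, List.contains_iff_mem, m1, m2, m3, m4]
        ring
      refine (PySem.List.foldl_congr_mem L _ _ (0 : Int) hA).trans ?_
      rw [PySem.List.foldl_add, List.foldl_map]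
      refine Eq.trans ?_ (PySem.List.foldl_congr_mem L _ _ (0 : Int) hB).symm
      rw [PySem.List.foldl_add]
      congr 1
      refine congrArg List.sum (List.map_congr_left fun ci hci => ?_)
      exact pv_core shift hs L hnd ci
    rw [hnei]

-- ===== VERDICT (by name: the statement is the Claim_ definition above) =====
theorem it_is_fine_spec : Claim_equal_it_is_fine := by
  intro grid candidates shift amount_of_people _ hpre
  unfold Spec_it_is_fine
  exact pv_main grid candidates shift amount_of_people hpre
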